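-- pv_equiv track=rewrite | github.com/dragneel786/leetcode_practise | 2317-maximum-xor-after-operations/2317-maximum-xor-after-operations.py | maximumXOR
-- ===== SOURCE A (Python) =====
-- from typing import List
--
-- def maximumXOR(nums: List[int]) -> int:
--     ret = 0
--     for num in nums:
--         place = 0
--         while(num):
--             ret |= (num & 1) << place
--             num >>= 1
--             place += 1
--
--     return ret
-- ===== SOURCE B (Python) =====
-- from typing import List
--
-- def maximumXOR(nums: List[int]) -> int:
--     ret = 0
--     for num in nums:
--         ret |= num
--     return ret
-- ===== Notes on version B (the rewrite author's own statement) =====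
-- stated objective: simpler
-- what changed: Replaced A's per-bit inner while loop (rebuilding each number bit by bit into ret) with a single-pass bitwise OR accumulation, ret |= num, with no inner loop.
-- outside the precondition, e.g. on maximumXOR([-1]): A does not finish within the time limit, B returns -1
import Mathlib
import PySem

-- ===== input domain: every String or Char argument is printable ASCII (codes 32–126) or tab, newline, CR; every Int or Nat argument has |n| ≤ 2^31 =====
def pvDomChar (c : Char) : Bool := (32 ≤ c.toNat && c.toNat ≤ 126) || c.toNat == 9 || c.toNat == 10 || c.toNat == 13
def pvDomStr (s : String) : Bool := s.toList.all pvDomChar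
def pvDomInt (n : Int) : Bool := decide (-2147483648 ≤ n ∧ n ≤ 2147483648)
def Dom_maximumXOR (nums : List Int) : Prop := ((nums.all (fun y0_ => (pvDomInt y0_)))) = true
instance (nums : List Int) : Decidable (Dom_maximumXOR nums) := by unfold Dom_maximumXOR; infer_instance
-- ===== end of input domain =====

-- B replaces A's per-bit inner while loop with a single-pass `ret |= num` (simpler, no inner loop).

-- ===== PORT A =====
-- inner while loop of A: while num: ret |= (num & 1) << place; num >>= 1; place += 1.
-- The loop variable `num` is carried as a Nat (exact for num ≥ 0, which Pre_ guarantees;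
-- on a negative num the Python loop never terminates, so those inputs are outside Pre_).
def maximumXOR_loop (num : Nat) (place : Nat) (ret : Int) : Int :=
  if num = 0 then ret
  else maximumXOR_loop (num >>> 1) (place + 1)
        (PySem.Int.bor ret ((PySem.Int.band (num : Int) 1) <<< place))
decreasing_by simp [Nat.shiftRight_succ]; omega

def maximumXOR (nums : List Int) : Int :=
  nums.foldl (fun ret num => maximumXOR_loop num.toNat 0 ret) 0

-- ===== PORT B =====
def maximumXOR_alt (nums : List Int) : Int :=
  nums.foldl (fun ret num => PySem.Int.bor ret num) 0

-- ===== PRECONDITION & SPEC =====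
-- Pre_ excludes lists containing a negative number: on those A's inner `while num:` loop
-- never terminates (Python's -1 >> 1 == -1), so A returns exactly on the all-nonnegative lists.
def Pre_maximumXOR (nums : List Int) : Prop := ∀ x ∈ nums, 0 ≤ x
instance (nums : List Int) : Decidable (Pre_maximumXOR nums) := by unfold Pre_maximumXOR; infer_instance
def pvWitness_maximumXOR : List Int := [3, 2, 10]

def Spec_maximumXOR (nums : List Int) (out : Int) : Prop := out = maximumXOR_alt nums
instance (nums : List Int) (out : Int) : Decidable (Spec_maximumXOR nums out) := by unfold Spec_maximumXOR; infer_instance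

-- ===== CLAIM (what is proved, stated in full; the proofs are below) =====
def Claim_equal_maximumXOR : Prop := ∀ (nums : List Int), Dom_maximumXOR nums → Pre_maximumXOR nums → Spec_maximumXOR nums (maximumXOR nums)

-- ===== LEMMAS AND PROOFS =====

-- Nat-level bit identity behind one step of A's loop.
theorem pv_nat_bit_split (n p : Nat) :
    ((n &&& 1) <<< p) ||| ((n >>> 1) <<< (p + 1)) = n <<< p := by
  apply Nat.eq_of_testBit_eq
  intro i
  simp only [Nat.testBit_or, Nat.testBit_shiftLeft, Nat.testBit_shiftRight]
  rcases Nat.lt_or_ge i p with h | h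
  · simp [Nat.not_le.mpr h, show ¬ p + 1 ≤ i by omega]
  · rcases Nat.eq_or_lt_of_le h with rfl | h'
    · simp [show ¬ p + 1 ≤ p by omega, Nat.and_one_is_mod]
    · have e1 : 1 + (i - (p + 1)) = i - p := by omega
      have e2 : n &&& 1 = n % 2 ^ 1 := by simp [Nat.and_one_is_mod]
      simp only [Nat.le_of_lt h', show p + 1 ≤ i by omega, e1, e2, decide_true,
        Bool.true_and, Nat.testBit_mod_two_pow, show ¬ i - p < 1 by omega,
        decide_false, Bool.false_and, Bool.false_or]

-- cast a shifted Nat into Int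
theorem pv_cast_shift (m p : Nat) : ((m : Int) <<< p) = ((m <<< p : Nat) : Int) := by
  simp [Int.shiftLeft_eq, Nat.shiftLeft_eq]

-- A's inner loop ORs n's bits, shifted by place, into ret.
theorem maximumXOR_loop_eq (n : Nat) : ∀ (p r : Nat),
    maximumXOR_loop n p (r : Int) = ((r ||| (n <<< p) : Nat) : Int) := by
  induction n using Nat.strong_induction_on with
  | _ n ih =>
    intro p r
    rw [maximumXOR_loop]
    by_cases h : n = 0
    · simp [h]
    · have hlt : n >>> 1 < n := by simp [Nat.shiftRight_succ]; omega
      have hb : (PySem.Int.band (n : Int) 1) = ((n &&& 1 : Nat) : Int) := by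
        simpa using PySem.Int.band_natCast n 1
      rw [if_neg h, hb, pv_cast_shift, PySem.Int.bor_natCast, ih _ hlt,
        Nat.or_assoc, pv_nat_bit_split]

theorem maximumXOR_step (num : Int) (r : Nat) :
    maximumXOR_loop num.toNat 0 (r : Int) = ((r ||| num.toNat : Nat) : Int) := by
  rw [maximumXOR_loop_eq]
  simp

-- Both folds, started from the same Nat-valued accumulator, agree on all-nonnegative lists.
theorem maximumXOR_fold_eq (l : List Int) (hl : ∀ x ∈ l, 0 ≤ x) : ∀ (r : Nat),
    l.foldl (fun ret num => maximumXOR_loop num.toNat 0 ret) (r : Int)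
      = l.foldl (fun ret num => PySem.Int.bor ret num) (r : Int) := by
  induction l with
  | nil => intro r; rfl
  | cons x xs ih =>
    intro r
    have hx : 0 ≤ x := hl x (List.mem_cons_self ..)
    have hxs : ∀ y ∈ xs, 0 ≤ y := fun y hy => hl y (List.mem_cons_of_mem _ hy)
    simp only [List.foldl_cons]
    rw [maximumXOR_step x r,
      show PySem.Int.bor (r : Int) x = ((r ||| x.toNat : Nat) : Int) by
        conv_lhs => rw [show x = ((x.toNat : Nat) : Int) by simp [Int.toNat_of_nonneg hx]]
        exact PySem.Int.bor_natCast r x.toNat]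
    exact ih hxs _

-- ===== VERDICT (by name: the statement is the Claim_ definition above) =====
theorem maximumXOR_spec : Claim_equal_maximumXOR := by
  intro nums _ hpre
  unfold Spec_maximumXOR maximumXOR maximumXOR_alt
  simpa using maximumXOR_fold_eq nums hpre 0
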